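-- pv_equiv track=rewrite | github.com/AlirezaAsgarian/DataStructure | DsHws/Hw3/JahesheReshteha.py | calculateHashSuffixes
-- ===== SOURCE A (Python) =====
-- m = 1024
--
-- p = 37
--
-- def calculateHashSuffixes(str):
--     suffixes = []
--     differSuffixes = []
--     sumOfSuffixes = 0
--     primeNumber = p
--     for i in range(0, len(str)):
--         sumOfSuffixes += (ord(str[i]) * primeNumber) % m
--         primeNumber = ((p * primeNumber) % m)
--         suffixes.append(sumOfSuffixes)
--     return suffixes
-- ===== SOURCE B (Python) =====
-- m = 1024
--
-- p = 37
--
-- def calculateHashSuffixes(str):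
--     # No running state: each output value is computed independently as the sum
--     # of its prefix's terms; terms use modular exponentiation, not a maintained power.
--     terms = [(ord(str[j]) * pow(p, j + 1, m)) % m for j in range(len(str))]
--     return [sum(terms[:i + 1]) for i in range(len(terms))]
-- ===== Notes on version B (the rewrite author's own statement) =====
-- stated objective: alternative
-- what changed: B keeps no running state at all: it builds the term list with independent modular exponentiations pow(p, j+1, m) and then computes each output value independently as the sum of a prefix slice of that list (O(n^2) brute force) instead of A's single pass threading a running sum and an incrementally maintained power.
import Mathlib
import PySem

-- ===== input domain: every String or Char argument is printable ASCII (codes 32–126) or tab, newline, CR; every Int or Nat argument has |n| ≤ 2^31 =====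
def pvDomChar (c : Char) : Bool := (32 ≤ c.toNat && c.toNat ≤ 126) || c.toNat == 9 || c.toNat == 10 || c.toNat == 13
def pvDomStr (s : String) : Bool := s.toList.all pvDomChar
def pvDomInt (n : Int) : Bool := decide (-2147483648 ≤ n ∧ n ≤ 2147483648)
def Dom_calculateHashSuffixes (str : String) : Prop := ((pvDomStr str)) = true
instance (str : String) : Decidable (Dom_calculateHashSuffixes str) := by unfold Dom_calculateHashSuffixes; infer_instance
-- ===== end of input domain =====

-- B drops all running state: each output is an independent sum over its prefix using
-- modular exponentiation (objective: alternative, O(n^2) instead of A's O(n) pass).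

-- ===== PORT A =====
-- state = (suffixes, sumOfSuffixes, primeNumber), exactly A's loop over the characters of str
def calculateHashSuffixes (str : String) : List Int :=
  (str.toList.foldl
    (fun (st : List Int × Int × Int) (c : Char) =>
      let sum := st.2.1 + PySem.Int.mod ((Int.ofNat c.toNat) * st.2.2) 1024
      (st.1 ++ [sum], sum, PySem.Int.mod (37 * st.2.2) 1024))
    ([], 0, 37)).1

-- ===== PORT B =====
-- terms comprehension, then per-index sums of prefix slices; str[j] with j < len(str)
-- ported as getD (always in range, exact); pow(37, j+1, 1024) ported as 37^(j+1) % 1024;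
-- terms[:i+1] ported as List.take (i+1)
def calculateHashSuffixes_alt (str : String) : List Int :=
  let terms := (List.range str.toList.length).map (fun j =>
    PySem.Int.mod ((Int.ofNat (str.toList.getD j ' ').toNat)
      * PySem.Int.mod ((37:Int) ^ (j + 1)) 1024) 1024)
  (List.range terms.length).map (fun i => (terms.take (i + 1)).sum)

-- ===== PRECONDITION & SPEC =====
def Spec_calculateHashSuffixes (str : String) (out : List Int) : Prop := out = calculateHashSuffixes_alt str
instance (str : String) (out : List Int) : Decidable (Spec_calculateHashSuffixes str out) := by unfold Spec_calculateHashSuffixes; infer_instance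

-- ===== CLAIM (what is proved, stated in full; the proofs are below) =====
def Claim_equal_calculateHashSuffixes : Prop := ∀ (str : String), Dom_calculateHashSuffixes str → Spec_calculateHashSuffixes str (calculateHashSuffixes str)

-- ===== LEMMAS AND PROOFS =====

-- the j-th term of the sum, with the exponent shifted by k (k = number of characters already consumed)
def pvTerm (cs : List Char) (k j : Nat) : Int :=
  PySem.Int.mod ((Int.ofNat (cs.getD j ' ').toNat)
    * PySem.Int.mod ((37:Int) ^ (k + j + 1)) 1024) 1024

lemma pvTerm_succ (c : Char) (r : List Char) (k j : Nat) :
    pvTerm (c :: r) k (j + 1) = pvTerm r (k + 1) j := by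
  simp [pvTerm]
  ring_nf

lemma pow_mod_step (k : Nat) :
    PySem.Int.mod (37 * PySem.Int.mod ((37:Int) ^ (k + 1)) 1024) 1024
      = PySem.Int.mod ((37:Int) ^ (k + 2)) 1024 := by
  rw [PySem.Int.mod_eq_emod_of_pos (by norm_num), PySem.Int.mod_eq_emod_of_pos (by norm_num),
      PySem.Int.mod_eq_emod_of_pos (by norm_num)]
  rw [Int.mul_emod, Int.emod_emod_of_dvd _ (dvd_refl _), ← Int.mul_emod]
  ring_nf

lemma prefix_sum_shift (c : Char) (r : List Char) (k i : Nat) :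
    ((List.range (i + 1 + 1)).map (pvTerm (c :: r) k)).sum
      = pvTerm (c :: r) k 0 + ((List.range (i + 1)).map (pvTerm r (k + 1))).sum := by
  rw [List.range_succ_eq_map]
  simp only [List.map_cons, List.map_map, List.sum_cons]
  congr 1
  apply congrArg
  apply List.map_congr_left
  intro j _
  exact pvTerm_succ c r k j

lemma foldA_eq (rest : List Char) : ∀ (k : Nat) (acc : List Int) (sum : Int),
    (rest.foldl
      (fun (st : List Int × Int × Int) (c : Char) =>
        let s := st.2.1 + PySem.Int.mod ((Int.ofNat c.toNat) * st.2.2) 1024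
        (st.1 ++ [s], s, PySem.Int.mod (37 * st.2.2) 1024))
      (acc, sum, PySem.Int.mod ((37:Int) ^ (k + 1)) 1024)).1
    = acc ++ (List.range rest.length).map
        (fun i => sum + ((List.range (i + 1)).map (pvTerm rest k)).sum) := by
  induction rest with
  | nil => intro k acc sum; simp
  | cons c r ih =>
    intro k acc sum
    simp only [List.foldl_cons]
    rw [pow_mod_step k]
    have h2 : PySem.Int.mod ((37:Int) ^ (k + 2)) 1024
        = PySem.Int.mod ((37:Int) ^ ((k + 1) + 1)) 1024 := by norm_num
    rw [h2, ih (k + 1)]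
    have ht0 : PySem.Int.mod ((Int.ofNat c.toNat) * PySem.Int.mod ((37:Int) ^ (k + 1)) 1024) 1024
        = pvTerm (c :: r) k 0 := by simp [pvTerm]
    rw [ht0, List.append_assoc]
    congr 1
    rw [List.length_cons, List.range_succ_eq_map]
    simp only [List.map_cons, List.map_map, List.singleton_append]
    congr 1
    · simp [pvTerm]
    · apply List.map_congr_left
      intro i _
      simp only [Function.comp_apply]
      rw [prefix_sum_shift c r k i]
      ring

-- ===== VERDICT (by name: the statement is the Claim_ definition above) =====
theorem calculateHashSuffixes_spec : Claim_equal_calculateHashSuffixes := by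
  intro str _
  unfold Spec_calculateHashSuffixes calculateHashSuffixes calculateHashSuffixes_alt
  have h := foldA_eq str.toList 0 [] 0
  rw [show PySem.Int.mod ((37:Int) ^ (0 + 1)) 1024 = 37 from by decide] at h
  rw [h]
  simp only [List.nil_append, zero_add, List.length_map, List.length_range]
  apply List.map_congr_left
  intro i hi
  rw [← List.map_take, List.take_range, Nat.min_eq_left (by simpa using List.mem_range.mp hi)]
  apply congrArg List.sum
  apply List.map_congr_left
  intro j _
  simp [pvTerm]
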